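-- pv_equiv track=rewrite | github.com/wherby/code | algorithm/OMOTQuestions/segmentTreeQueryTimeOut/segmentTreePreProcessTimeout/useLogTrick.py | minStable
-- ===== SOURCE A (Python) =====
-- from typing import List, Tuple, Optional
-- import math
-- from bisect import bisect_right,insort_left,bisect_left
--
-- def minStable(nums: List[int], maxC: int) -> int:
--     def check(upper: int) -> bool:
--         intervals = []  # (子数组 GCD，最小左端点)
--         c = maxC
--         for i, x in enumerate(nums):
--             # 计算以 i 为右端点的子数组 GCD
--             for p in intervals:
--                 p[0] = math.gcd(p[0], x)
--             # nums[i] 单独一个数作为子数组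
--             intervals.append([x, i])
--
--             # 去重（合并 GCD 相同的区间）
--             idx = 1
--             for j in range(1, len(intervals)):
--                 if intervals[j][0] != intervals[j - 1][0]:
--                     intervals[idx] = intervals[j]
--                     idx += 1
--             del intervals[idx:]
--
--             # intervals 的性质：越靠左，GCD 越小
--
--             # 我们只关心 GCD >= 2 的子数组
--             if intervals[0][0] == 1:
--                 intervals.pop(0)
--
--             # intervals[0] 的 GCD >= 2 且最长，取其区间左端点作为子数组的最小左端点
--             if intervals and i - intervals[0][1] + 1 > upper:
--                 if c == 0:
--                     return False
--                 c -= 1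
--                 intervals.clear()  # 修改后 GCD 均为 1，直接清空
--         return True
--
--     return bisect_left(range(len(nums) // (maxC + 1)), True, key=check)
-- ===== SOURCE B (Python) =====
-- from typing import List
-- import math
-- from bisect import bisect_left
--
--
-- def minStable(nums: List[int], maxC: int) -> int:
--     # One pass per check with a single "start" bound instead of the interval list:
--     # for each right endpoint i, scan left accumulating the gcd to find the
--     # smallest left endpoint whose subarray value is not 1.
--     def check(upper: int) -> bool:
--         start = 0
--         c = maxC
--         for i, x in enumerate(nums):
--             g = x
--             best = i if g != 1 else None
--             for L in range(i - 1, start - 1, -1):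
--                 g = math.gcd(g, nums[L])
--                 if g == 1:
--                     break
--                 best = L
--             if best is not None and i - best + 1 > upper:
--                 if c == 0:
--                     return False
--                 c -= 1
--                 start = i + 1  # after the fix all gcds here are 1
--         return True
--
--     return bisect_left(range(len(nums) // (maxC + 1)), True, key=check)
-- ===== Notes on version B (the rewrite author's own statement) =====
-- stated objective: alternative
-- what changed: B drops A's per-endpoint list of (gcd, left-endpoint) intervals with its update/append/dedup/pop bookkeeping and instead keeps a single left bound 'start', finding for each right endpoint the smallest left endpoint with subarray gcd != 1 by a direct leftward gcd scan that stops as soon as the gcd collapses to 1; the outer bisect_left over check is unchanged.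
import Mathlib
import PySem

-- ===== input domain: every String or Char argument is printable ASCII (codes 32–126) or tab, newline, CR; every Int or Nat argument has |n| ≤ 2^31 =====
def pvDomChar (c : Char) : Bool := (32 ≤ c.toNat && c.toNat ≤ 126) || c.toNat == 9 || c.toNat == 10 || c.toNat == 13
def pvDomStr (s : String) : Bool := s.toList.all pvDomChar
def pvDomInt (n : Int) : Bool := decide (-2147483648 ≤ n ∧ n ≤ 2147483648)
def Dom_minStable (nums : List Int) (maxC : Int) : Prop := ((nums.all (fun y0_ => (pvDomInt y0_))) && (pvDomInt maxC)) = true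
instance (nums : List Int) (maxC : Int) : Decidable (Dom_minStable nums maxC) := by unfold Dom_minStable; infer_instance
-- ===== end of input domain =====

-- B replaces A's per-endpoint interval list (log trick) by a single left bound and a
-- leftward gcd scan per right endpoint that stops once the gcd collapses to 1:
-- an alternative decomposition of the same check, not claimed faster.

-- ===== PORT A =====
-- A's in-place dedup loop: element j is kept iff its value differs from the ORIGINAL
-- element j-1 (the loop's writes never touch index j-1 before that compare), so it is
-- exactly this keep-first-of-each-run recursion.
def pvDedupGo (prev : Int) : List (Int × Nat) → List (Int × Nat)
  | [] => []
  | q :: rest => if q.1 ≠ prev then q :: pvDedupGo q.1 rest else pvDedupGo q.1 rest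

def pvDedup : List (Int × Nat) → List (Int × Nat)
  | [] => []
  | p :: rest => p :: pvDedupGo p.1 rest

-- one iteration of A's loop body, up to and including `intervals.pop(0)`
def pvStepA (intervals : List (Int × Nat)) (x : Int) (i : Nat) : List (Int × Nat) :=
  let updated := intervals.map (fun p => ((Int.gcd p.1 x : Int), p.2))  -- p[0] = math.gcd(p[0], x)
  let appended := updated ++ [(x, i)]                                   -- intervals.append([x, i])
  let deduped := pvDedup appended
  match deduped with                                                    -- if intervals[0][0] == 1: pop(0)
  | (v, l) :: rest => if v = 1 then rest else (v, l) :: rest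
  | [] => []

-- the `for i, x in enumerate(nums)` loop of A's check, with early return False
def pvGoA : List Int → Nat → List (Int × Nat) → Int → Int → Bool
  | [], _, _, _, _ => true
  | x :: rest, i, intervals, c, upper =>
    let intervals' := pvStepA intervals x i
    match intervals' with
    | (_, l) :: _ =>
      if (i : Int) - (l : Int) + 1 > upper then
        if c = 0 then false
        else pvGoA rest (i + 1) [] (c - 1) upper                        -- intervals.clear()
      else pvGoA rest (i + 1) intervals' c upper
    | [] => pvGoA rest (i + 1) intervals' c upper

def pvCheckA (nums : List Int) (maxC upper : Int) : Bool := pvGoA nums 0 [] maxC upper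

-- bisect_left(range(k), True, key=check): standard bisect_left, a[mid] = mid,
-- `key(a[mid]) < True` is `check(mid) = false`
def pvBisectA (nums : List Int) (maxC : Int) (lo hi : Nat) : Nat :=
  if _h : lo < hi then
    if pvCheckA nums maxC (((lo + hi) / 2 : Nat) : Int) = false then
      pvBisectA nums maxC ((lo + hi) / 2 + 1) hi
    else
      pvBisectA nums maxC lo ((lo + hi) / 2)
  else lo
termination_by hi - lo
decreasing_by all_goals omega

def minStable (nums : List Int) (maxC : Int) : Int :=
  -- len(range(len(nums) // (maxC + 1))) = max(k, 0) = k.toNat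
  ((pvBisectA nums maxC 0 (PySem.Int.floordiv (nums.length : Int) (maxC + 1)).toNat : Nat) : Int)

-- ===== PORT B =====
-- B's inner loop: for L in range(i-1, start-1, -1): g = gcd(g, nums[L]); break on g == 1
-- (k counts the remaining iterations, i.e. k = L + 1 - start)
def pvInnerB (nums : List Int) (g : Int) (best : Option Nat) (L : Nat) : Nat → Option Nat
  | 0 => best
  | k + 1 =>
    let g' : Int := (Int.gcd g (nums.getD L 0) : Int)
    if g' = 1 then best else pvInnerB nums g' (some L) (L - 1) k

-- the `for i, x in enumerate(nums)` loop of B's check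
def pvGoB (nums : List Int) : List Int → Nat → Nat → Int → Int → Bool
  | [], _, _, _, _ => true
  | x :: rest, i, start, c, upper =>
    let best := pvInnerB nums x (if x ≠ 1 then some i else none) (i - 1) (i - start)
    match best with
    | some m =>
      if (i : Int) - (m : Int) + 1 > upper then
        if c = 0 then false
        else pvGoB nums rest (i + 1) (i + 1) (c - 1) upper              -- start = i + 1
      else pvGoB nums rest (i + 1) start c upper
    | none => pvGoB nums rest (i + 1) start c upper

def pvCheckB (nums : List Int) (maxC upper : Int) : Bool := pvGoB nums nums 0 0 maxC upper

def pvBisectB (nums : List Int) (maxC : Int) (lo hi : Nat) : Nat :=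
  if _h : lo < hi then
    if pvCheckB nums maxC (((lo + hi) / 2 : Nat) : Int) = false then
      pvBisectB nums maxC ((lo + hi) / 2 + 1) hi
    else
      pvBisectB nums maxC lo ((lo + hi) / 2)
  else lo
termination_by hi - lo
decreasing_by all_goals omega

def minStable_alt (nums : List Int) (maxC : Int) : Int :=
  ((pvBisectB nums maxC 0 (PySem.Int.floordiv (nums.length : Int) (maxC + 1)).toNat : Nat) : Int)

-- ===== PRECONDITION & SPEC =====
-- Pre_ excludes exactly maxC = -1, where `len(nums) // (maxC + 1)` raises ZeroDivisionError in A (and in B).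
def Pre_minStable (nums : List Int) (maxC : Int) : Prop := maxC ≠ -1
instance (nums : List Int) (maxC : Int) : Decidable (Pre_minStable nums maxC) := by
  unfold Pre_minStable; infer_instance

def pvWitness_minStable : List Int × Int := ([6, 3, 2, 5], 1)

def Spec_minStable (nums : List Int) (maxC : Int) (out : Int) : Prop := out = minStable_alt nums maxC
instance (nums : List Int) (maxC : Int) (out : Int) : Decidable (Spec_minStable nums maxC out) := by
  unfold Spec_minStable; infer_instance

-- ===== CLAIM (what is proved, stated in full; the proofs are below) =====
def Claim_equal_minStable : Prop := ∀ (nums : List Int) (maxC : Int), Dom_minStable nums maxC → Pre_minStable nums maxC → Spec_minStable nums maxC (minStable nums maxC)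

-- ===== LEMMAS AND PROOFS =====

-- value of the subarray nums[L..i] as A tracks it: raw nums[L] when L = i, else the
-- running gcd (extended one index at a time on the right)
def pvGval (nums : List Int) (L : Nat) : Nat → Int
  | 0 => nums.getD L 0
  | i + 1 => if L < i + 1 then ((Int.gcd (pvGval nums L i) (nums.getD (i + 1) 0) : Nat) : Int)
             else nums.getD L 0

-- the undeduplicated row of (value, left) pairs for right endpoint i and left bound start
def pvRow (nums : List Int) (start i : Nat) : List (Int × Nat) :=
  (List.range' start (i + 1 - start)).map (fun L => (pvGval nums L i, L))

-- A's interval state at entry of iteration i (left bound start)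
def pvState (nums : List Int) (start i : Nat) : List (Int × Nat) :=
  pvDedup (((List.range' start (i - start)).map (fun L => (pvGval nums L (i - 1), L))).dropWhile
    (fun p => p.1 == 1))


-- abbreviation used throughout: the gcd-with-x update A applies to each tracked pair
def pvUpd (x : Int) (p : Int × Nat) : Int × Nat := ((Int.gcd p.1 x : Int), p.2)

lemma pvGval_self (nums : List Int) (L : Nat) : pvGval nums L L = nums.getD L 0 := by
  cases L with
  | zero => rfl
  | succ j => simp [pvGval]

lemma pvGval_of_lt (nums : List Int) {L i : Nat} (h : L < i) :
    pvGval nums L i = ((Int.gcd (pvGval nums L (i - 1)) (nums.getD i 0) : Nat) : Int) := by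
  cases i with
  | zero => omega
  | succ j => simp [pvGval, h]

-- the row at right endpoint i is the previous row updated by gcd with x, plus the fresh pair
lemma pvRow_succ (nums : List Int) {start i : Nat} (h : start ≤ i) :
    pvRow nums start i =
      ((List.range' start (i - start)).map (fun L => (pvGval nums L (i - 1), L))).map
          (pvUpd (nums.getD i 0)) ++ [(nums.getD i 0, i)] := by
  have hn : i + 1 - start = (i - start) + 1 := by omega
  rw [pvRow, hn, List.range'_1_concat, List.map_append, List.map_map]
  have hlast : start + (i - start) = i := by omega
  congr 1
  · apply List.map_congr_left
    intro L hL
    have hLi : L < i := by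
      rcases List.mem_range'.1 hL with ⟨j, hj, rfl⟩
      omega
    simp [Function.comp, pvUpd, pvGval_of_lt nums hLi]
  · simp [hlast, pvGval_self]

lemma pvDedupGo_map_dedup (x : Int) (t : List (Int × Nat)) :
    ∀ (l : List (Int × Nat)) (prev : Int),
      pvDedupGo ((Int.gcd prev x : Nat) : Int) (((pvDedupGo prev l).map (pvUpd x)) ++ t) =
      pvDedupGo ((Int.gcd prev x : Nat) : Int) ((l.map (pvUpd x)) ++ t) := by
  intro l
  induction l with
  | nil => intro prev; rfl
  | cons q s ih =>
    intro prev
    by_cases hq : q.1 = prev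
    · simp only [pvDedupGo, hq, ne_eq, not_true_eq_false, if_false, List.map_cons,
        List.cons_append, pvUpd]
      exact ih prev
    · simp only [pvDedupGo, ne_eq, hq, not_false_eq_true, if_true, List.map_cons,
        List.cons_append, pvUpd]
      split_ifs with hgx
      · rw [ih q.1]
      · rw [ih q.1]

lemma pvDedup_map_dedup (x : Int) (t : List (Int × Nat)) (l : List (Int × Nat)) :
    pvDedup (((pvDedup l).map (pvUpd x)) ++ t) = pvDedup ((l.map (pvUpd x)) ++ t) := by
  cases l with
  | nil => rfl
  | cons p s =>
    simp only [pvDedup, List.map_cons, List.cons_append, pvUpd]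
    rw [show ((Int.gcd p.1 x : Nat) : Int) = (pvUpd x p).1 from rfl] at *
    exact congrArg _ (pvDedupGo_map_dedup x t s p.1)

-- dedup starting from previous value 1 = dedup of the list with its leading-1 run removed
lemma pvDedupGo_one (z : List (Int × Nat)) :
    pvDedupGo 1 z = pvDedup (z.dropWhile (fun p => p.1 == 1)) := by
  induction z with
  | nil => rfl
  | cons w z' ih =>
    rw [pvDedupGo, List.dropWhile_cons]
    by_cases hw : w.1 = 1
    · rw [if_neg (by simp [hw]), if_pos (by simpa using hw), hw]
      exact ih
    · rw [if_pos (by simpa using hw), if_neg (by simpa using hw), pvDedup]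

-- A's pop-a-leading-1, as a named function so that it can be rewritten under
def pvPop1 (d : List (Int × Nat)) : List (Int × Nat) :=
  match d with
  | (v, l) :: rest => if v = 1 then rest else (v, l) :: rest
  | [] => []

lemma pvStepA_eq (intervals : List (Int × Nat)) (x : Int) (i : Nat) :
    pvStepA intervals x i =
      pvPop1 (pvDedup ((intervals.map (pvUpd x)) ++ [(x, i)])) := by
  rfl

-- pop-a-leading-1 after dedup = dedup of the list with its leading-1 run removed
lemma pvPop_dedup (z : List (Int × Nat)) :
    pvPop1 (pvDedup z) = pvDedup (z.dropWhile (fun p => p.1 == 1)) := by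
  cases z with
  | nil => rfl
  | cons w z' =>
    rw [pvDedup, List.dropWhile_cons]
    by_cases hw : w.1 = 1
    · rw [if_pos (by simpa using hw)]
      show (if w.1 = 1 then pvDedupGo w.1 z' else (w.1, w.2) :: pvDedupGo w.1 z') = _
      rw [if_pos hw, hw]
      exact pvDedupGo_one z'
    · rw [if_neg (by simpa using hw)]
      show (if w.1 = 1 then pvDedupGo w.1 z' else (w.1, w.2) :: pvDedupGo w.1 z') = _
      rw [if_neg hw, pvDedup]

lemma dropWhile_ones_append (ones s : List (Int × Nat)) (h : ∀ p ∈ ones, p.1 = 1) :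
    (ones ++ s).dropWhile (fun p => p.1 == 1) = s.dropWhile (fun p => p.1 == 1) := by
  induction ones with
  | nil => rfl
  | cons o os ih =>
    have ho : o.1 = 1 := h o (by simp)
    simp only [List.cons_append, List.dropWhile_cons]
    rw [if_pos (by simpa using ho)]
    exact ih (fun p hp => h p (by simp [hp]))

-- the step lemma: one iteration of A's body maps the state at i to the state at i+1
lemma pvStepA_state (nums : List Int) {start i : Nat} (h : start ≤ i) :
    pvStepA (pvState nums start i) (nums.getD i 0) i = pvState nums start (i + 1) := by
  set x := nums.getD i 0 with hx
  set prevRow := (List.range' start (i - start)).map (fun L => (pvGval nums L (i - 1), L))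
    with hprev
  have hrow : pvRow nums start i = prevRow.map (pvUpd x) ++ [(x, i)] := pvRow_succ nums h
  have hstate1 : pvState nums start (i + 1) =
      pvDedup ((pvRow nums start i).dropWhile (fun p => p.1 == 1)) := by
    simp only [pvState, pvRow, Nat.add_sub_cancel]
  have hsplit : prevRow = prevRow.takeWhile (fun p => p.1 == 1) ++
      prevRow.dropWhile (fun p => p.1 == 1) := (List.takeWhile_append_dropWhile).symm
  have hones : ∀ p ∈ (prevRow.takeWhile (fun p => p.1 == 1)).map (pvUpd x), p.1 = 1 := by
    intro p hp
    rcases List.mem_map.1 hp with ⟨q, hq, rfl⟩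
    have hq1 : q.1 = 1 := by simpa using List.mem_takeWhile_imp hq
    simp [pvUpd, hq1]
  have hst : pvState nums start i = pvDedup (prevRow.dropWhile (fun p => p.1 == 1)) := rfl
  rw [pvStepA_eq, hst, pvDedup_map_dedup x [(x, i)] (prevRow.dropWhile (fun p => p.1 == 1)),
    pvPop_dedup, hstate1, hrow]
  congr 1
  conv_rhs => rw [hsplit]
  rw [List.map_append, List.append_assoc, dropWhile_ones_append _ _ hones]

-- right-unfolding of pvGval: extend the subarray on the LEFT by one element
lemma pvGval_right (nums : List Int) : ∀ {i L : Nat}, L < i →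
    pvGval nums L i = ((Int.gcd (nums.getD L 0) (pvGval nums (L + 1) i) : Nat) : Int) := by
  intro i
  induction i with
  | zero => intro L h; omega
  | succ j ih =>
    intro L h
    by_cases hLj : L < j
    · rw [pvGval_of_lt nums h, Nat.add_sub_cancel, ih hLj,
        pvGval_of_lt nums (show L + 1 < j + 1 by omega), Nat.add_sub_cancel]
      exact_mod_cast congrArg (fun n : Nat => (n : Int))
        (Int.gcd_assoc (nums.getD L 0) (pvGval nums (L + 1) j) (nums.getD (j + 1) 0))
    · have hLj' : L = j := by omega
      subst hLj'
      rw [pvGval_of_lt nums h, Nat.add_sub_cancel, pvGval_self, pvGval_self]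

-- once a value hits 1, every longer subarray (smaller left endpoint) has value 1
lemma pvGval_one_mono (nums : List Int) {i L : Nat} (hL : L < i) (h : pvGval nums (L + 1) i = 1) :
    pvGval nums L i = 1 := by
  rw [pvGval_right nums hL, h]
  simp

-- descend: if the value at left endpoint L is 1, so is every value at L' ≤ L
lemma pvGval_one_of_le (nums : List Int) {i L : Nat} (hLi : L < i) (h1 : pvGval nums L i = 1) :
    ∀ L', L' ≤ L → pvGval nums L' i = 1 := by
  have key : ∀ d L', L' + d = L → pvGval nums L' i = 1 := by
    intro d
    induction d with
    | zero =>
      intro L' h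
      have hE : L' = L := by omega
      rw [hE]; exact h1
    | succ d ihd =>
      intro L' h
      have h2 : pvGval nums (L' + 1) i = 1 := ihd (L' + 1) (by omega)
      exact pvGval_one_mono nums (by omega) h2
  intro L' hle
  exact key (L - L') L' (by omega)

-- head of the state = first pair of the row whose value is not 1
lemma pvDedup_head (z : List (Int × Nat)) : (pvDedup z).head? = z.head? := by
  cases z <;> rfl

lemma pvState_head (nums : List Int) (start i : Nat) :
    (pvState nums start (i + 1)).head? =
      Option.map (fun L => (pvGval nums L i, L))
        ((List.range' start (i + 1 - start)).find? (fun L => !(pvGval nums L i == 1))) := by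
  have h1 : pvState nums start (i + 1) =
      pvDedup ((pvRow nums start i).dropWhile (fun p => p.1 == 1)) := by
    simp only [pvState, pvRow, Nat.add_sub_cancel]
  rw [h1, pvDedup_head]
  have hpred : (fun a : Int × Nat => !(!(a.1 == 1))) = (fun p : Int × Nat => p.1 == 1) := by
    funext p
    simp
  have h2 : (pvRow nums start i).find? (fun p => !(p.1 == 1)) =
      ((pvRow nums start i).dropWhile (fun p => p.1 == 1)).head? := by
    rw [List.find?_eq_head?_dropWhile_not, hpred]
  rw [← h2, pvRow, List.find?_map]
  rfl

-- when nums[i] = 1, every value of the row at i is 1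
lemma pvGval_all_one (nums : List Int) {i : Nat} (hx : nums.getD i 0 = 1) :
    ∀ L ≤ i, pvGval nums L i = 1 := by
  intro L hL
  rcases Nat.lt_or_ge L i with hlt | hge
  · rw [pvGval_of_lt nums hlt, hx]
    simp
  · have : L = i := by omega
    rw [this, pvGval_self, hx]

-- B's inner scan finds the first left endpoint of the row whose value is not 1
lemma pvInnerB_spec (nums : List Int) (start i : Nat) :
    ∀ k L, start + k = L + 1 → L + 1 ≤ i → pvGval nums (L + 1) i ≠ 1 →
      pvInnerB nums (pvGval nums (L + 1) i) (some (L + 1)) L k =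
        (List.range' start (L + 2 - start)).find? (fun L' => !(pvGval nums L' i == 1)) := by
  intro k
  induction k with
  | zero =>
    intro L hk hLi hne
    have hs : start = L + 1 := by omega
    subst hs
    have hr : L + 2 - (L + 1) = 1 := by omega
    rw [hr]
    simp [pvInnerB, List.range', hne]
  | succ k ih =>
    intro L hk hLi hne
    have hLlt : L < i := by omega
    have hg' : ((Int.gcd (pvGval nums (L + 1) i) (nums.getD L 0) : Nat) : Int) =
        pvGval nums L i := by
      rw [pvGval_right nums hLlt, Int.gcd_comm]
    rw [pvInnerB]
    rw [hg']
    have hsplit : List.range' start (L + 2 - start) =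
        List.range' start (k + 1) ++ [start + (k + 1)] := by
      rw [← List.range'_1_concat]
      congr 1
      omega
    have hlast : start + (k + 1) = L + 1 := by omega
    by_cases h1 : pvGval nums L i = 1
    · rw [if_pos h1, hsplit, List.find?_append]
      have hnone : (List.range' start (k + 1)).find? (fun L' => !(pvGval nums L' i == 1)) =
          none := by
        rw [List.find?_eq_none]
        intro L' hL'
        have hle : L' ≤ L := by
          rcases List.mem_range'.1 hL' with ⟨j, hj, rfl⟩
          omega
        have := pvGval_one_of_le nums hLlt h1 L' hle
        simp [this]
      rw [hnone, hlast]
      have hb : (!(pvGval nums (L + 1) i == 1)) = true := by simpa using hne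
      simp [List.find?, hb]
    · rw [if_neg h1]
      cases k with
      | zero =>
        have hsL : start = L := by omega
        have hr2 : L + 2 - start = 2 := by omega
        rw [hr2]
        have hb : (!(pvGval nums L i == 1)) = true := by simpa using h1
        rw [hsL]
        simp [pvInnerB, List.range', hb]
      | succ k' =>
        have hL1 : 1 ≤ L := by omega
        have hLsub : L - 1 + 1 = L := by omega
        have ih' := ih (L - 1) (by omega) (by omega) (by rw [hLsub]; exact h1)
        rw [hLsub] at ih'
        rw [ih']
        have hsplit2 : List.range' start (L + 2 - start) =
            List.range' start (L + 1 - start) ++ [start + (L + 1 - start)] := by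
          rw [← List.range'_1_concat]
          congr 1
          omega
        have hLsub2 : L - 1 + 2 - start = L + 1 - start := by omega
        rw [hLsub2, hsplit2, List.find?_append]
        have hmemL : L ∈ List.range' start (L + 1 - start) := by
          rw [List.mem_range']
          exact ⟨L - start, by omega, by omega⟩
        cases hf : (List.range' start (L + 1 - start)).find? (fun L' => !(pvGval nums L' i == 1)) with
        | none =>
          exfalso
          have := List.find?_eq_none.1 hf L hmemL
          simp [h1] at this
        | some v => rfl

-- B's best = the first left endpoint of the row whose value is not 1
lemma pvBest_eq (nums : List Int) {start i : Nat} (h : start ≤ i) :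
    pvInnerB nums (nums.getD i 0)
        (if nums.getD i 0 ≠ 1 then some i else none) (i - 1) (i - start) =
      (List.range' start (i + 1 - start)).find? (fun L => !(pvGval nums L i == 1)) := by
  by_cases hx : nums.getD i 0 = 1
  · rw [if_neg (fun hcon => hcon hx)]
    have hnone : (List.range' start (i + 1 - start)).find? (fun L => !(pvGval nums L i == 1)) =
        none := by
      rw [List.find?_eq_none]
      intro L hL
      have hle : L ≤ i := by
        rcases List.mem_range'.1 hL with ⟨j, hj, rfl⟩
        omega
      simp [pvGval_all_one nums hx L hle]
    rw [hnone]
    cases hk : i - start with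
    | zero => rfl
    | succ k =>
      have hcond : ((Int.gcd (nums.getD i 0) (nums.getD (i - 1) 0) : Nat) : Int) = 1 := by
        rw [hx]
        simp
      simp only [pvInnerB]
      rw [if_pos hcond]
  · rw [if_pos hx]
    rcases Nat.eq_or_lt_of_le h with heq | hlt
    · subst heq
      have h0 : start - start = 0 := by omega
      have h1 : start + 1 - start = 1 := by omega
      rw [h0, h1]
      have : pvGval nums start start ≠ 1 := by rw [pvGval_self]; exact hx
      simp [pvInnerB, List.range', this]
    · have hI : i - 1 + 1 = i := by omega
      have hgi : pvGval nums i i = nums.getD i 0 := pvGval_self nums i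
      have := pvInnerB_spec nums start i (i - start) (i - 1) (by omega) (by omega)
        (by rw [hI, hgi]; exact hx)
      rw [hI, hgi] at this
      have hcnt : i - 1 + 2 - start = i + 1 - start := by omega
      rw [hcnt] at this
      rw [this]

-- the empty state at a fresh left bound
lemma pvState_self (nums : List Int) (j : Nat) : pvState nums j j = [] := by
  simp [pvState, pvDedup]

-- drop-step helpers
lemma pvDrop_getD (nums : List Int) {i : Nat} {x : Int} {r : List Int}
    (h : nums.drop i = x :: r) : nums.getD i 0 = x := by
  have h1 : nums[i]? = some x := by
    rw [← List.head?_drop, h]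
    rfl
  simp [List.getD_eq_getElem?_getD, h1]

lemma pvDrop_succ (nums : List Int) {i : Nat} {x : Int} {r : List Int}
    (h : nums.drop i = x :: r) : nums.drop (i + 1) = r := by
  rw [← List.tail_drop, h]
  rfl

-- the main loop equivalence
lemma pvGo_eq (nums : List Int) (upper : Int) :
    ∀ (rest : List Int) (i start : Nat) (c : Int), start ≤ i → rest = nums.drop i →
      pvGoA rest i (pvState nums start i) c upper = pvGoB nums rest i start c upper := by
  intro rest
  induction rest with
  | nil => intro i start c _ _; rfl
  | cons x r ih =>
    intro i start c hsi hdrop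
    have hx : nums.getD i 0 = x := pvDrop_getD nums hdrop.symm
    have hdrop' : r = nums.drop (i + 1) := (pvDrop_succ nums hdrop.symm).symm
    rw [pvGoA, pvGoB]
    have hstep : pvStepA (pvState nums start i) x i = pvState nums start (i + 1) := by
      rw [← hx]
      exact pvStepA_state nums hsi
    rw [hstep]
    have hbest : pvInnerB nums x (if x ≠ 1 then some i else none) (i - 1) (i - start) =
        (List.range' start (i + 1 - start)).find? (fun L => !(pvGval nums L i == 1)) := by
      rw [← hx]
      exact pvBest_eq nums hsi
    rw [hbest]
    have hhead := pvState_head nums start i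
    cases hf : (List.range' start (i + 1 - start)).find? (fun L => !(pvGval nums L i == 1)) with
    | none =>
      rw [hf] at hhead
      have hempty : pvState nums start (i + 1) = [] := by
        cases hE : pvState nums start (i + 1) with
        | nil => rfl
        | cons a t => rw [hE] at hhead; simp at hhead
      rw [hempty]
      have := ih (i + 1) start c (by omega) hdrop'
      rw [hempty] at this
      exact this
    | some m =>
      rw [hf] at hhead
      cases hE : pvState nums start (i + 1) with
      | nil => rw [hE] at hhead; simp at hhead
      | cons a t =>
        rw [hE] at hhead
        have ha : a = (pvGval nums m i, m) := by
          simp only [List.head?_cons, Option.map_some] at hhead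
          exact (Option.some_injective _ hhead)
        subst ha
        dsimp only
        by_cases htrig : (i : Int) - (m : Int) + 1 > upper
        · rw [if_pos htrig, if_pos htrig]
          by_cases hc : c = 0
          · rw [if_pos hc, if_pos hc]
          · rw [if_neg hc, if_neg hc]
            have := ih (i + 1) (i + 1) (c - 1) (by omega) hdrop'
            rw [pvState_self] at this
            exact this
        · rw [if_neg htrig, if_neg htrig]
          have := ih (i + 1) start c (by omega) hdrop'
          rw [hE] at this
          exact this

lemma pvCheck_eq (nums : List Int) (maxC upper : Int) :
    pvCheckA nums maxC upper = pvCheckB nums maxC upper := by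
  have h0 : pvState nums 0 0 = [] := pvState_self nums 0
  have := pvGo_eq nums upper nums 0 0 maxC (le_refl 0) (by simp)
  rw [h0] at this
  exact this

lemma pvBisect_eq (nums : List Int) (maxC : Int) :
    ∀ (n lo hi : Nat), hi - lo ≤ n → pvBisectA nums maxC lo hi = pvBisectB nums maxC lo hi := by
  intro n
  induction n with
  | zero =>
    intro lo hi h
    rw [pvBisectA, pvBisectB]
    have : ¬ lo < hi := by omega
    simp [this]
  | succ n ihn =>
    intro lo hi h
    rw [pvBisectA, pvBisectB]
    by_cases hlt : lo < hi
    · simp only [hlt, dif_pos]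
      rw [pvCheck_eq]
      split_ifs
      · exact ihn ((lo + hi) / 2 + 1) hi (by omega)
      · exact ihn lo ((lo + hi) / 2) (by omega)
    · simp [hlt]

theorem minStable_spec : Claim_equal_minStable := by
  intro nums maxC _ _
  show minStable nums maxC = minStable_alt nums maxC
  rw [minStable, minStable_alt]
  exact congrArg _ (pvBisect_eq nums maxC _ 0 _ (le_refl _))
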